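-- pv_equiv track=rewrite | github.com/matuspintek-boop/ib111 | 08/p3_rotated.py | is_cyclically_sorted
-- ===== SOURCE A (Python) =====
-- def is_cyclically_sorted(records: list[int]) -> bool:
--     if len(records) == 0:
--         return True
--
--     decline_tokens: int = 1
--     iterator: int = 0
--
--     while decline_tokens >= 0 and iterator < len(records) - 1:
--         if records[iterator] > records[iterator + 1]:
--             decline_tokens -= 1
--         iterator += 1
--
--     if decline_tokens < 0:
--         return False
--     if decline_tokens == 0:
--         return records[-1] <= records[0]
--     return True
-- ===== SOURCE B (Python) =====
-- def is_cyclically_sorted(records: list[int]) -> bool: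
--     # Rotate-and-verify: cut the list at its first descent; the list is
--     # cyclically sorted iff the rotation starting right after that cut is
--     # a plain sorted list.
--     pivot = next((i for i in range(len(records) - 1)
--                   if records[i] > records[i + 1]), None)
--     if pivot is None:
--         return True
--     rotated = records[pivot + 1:] + records[:pivot + 1]
--     return all(a <= b for a, b in zip(rotated, rotated[1:]))
-- ===== Notes on version B (the rewrite author's own statement) =====
-- stated objective: alternative
-- what changed: Instead of A's token-budget descent-counting loop with a separate wrap-around check, B locates the first descent, cuts the list there, and verifies that the rotation starting after the cut is a plain sorted list (pairwise zip check on the rotated list).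
import Mathlib
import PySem

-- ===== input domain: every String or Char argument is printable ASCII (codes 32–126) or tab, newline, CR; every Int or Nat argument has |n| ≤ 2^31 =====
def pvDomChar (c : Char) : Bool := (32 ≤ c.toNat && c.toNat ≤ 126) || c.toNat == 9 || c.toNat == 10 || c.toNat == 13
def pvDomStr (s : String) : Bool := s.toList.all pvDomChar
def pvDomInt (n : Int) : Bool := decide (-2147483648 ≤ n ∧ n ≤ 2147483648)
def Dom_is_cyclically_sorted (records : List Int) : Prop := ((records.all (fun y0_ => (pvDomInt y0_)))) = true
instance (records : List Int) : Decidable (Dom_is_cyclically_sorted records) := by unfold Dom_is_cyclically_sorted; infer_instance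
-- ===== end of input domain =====

-- B replaces A's token-budget early-exit loop plus wrap-around special case by a
-- rotate-and-verify strategy: cut at the first descent and check the rotation is
-- a plain sorted list; objective: alternative (same cost, different algorithm).

-- ===== PORT A =====
-- the while loop; indices iterator, iterator+1 are in range by the loop guard, so pyGetD is exact
def pvA_loop (records : List Int) (tokens : Int) (iterator : Int) : Int :=
  if h : 0 ≤ tokens ∧ iterator < (records.length : Int) - 1 then
    pvA_loop records
      (if PySem.List.pyGetD records iterator 0 > PySem.List.pyGetD records (iterator + 1) 0
        then tokens - 1 else tokens)
      (iterator + 1)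
  else tokens
termination_by ((records.length : Int) - 1 - iterator).toNat
decreasing_by omega

def is_cyclically_sorted (records : List Int) : Bool :=
  if records.length = 0 then true
  else
    let tokens := pvA_loop records 1 0
    if tokens < 0 then false
    else if tokens = 0 then
      decide (PySem.List.pyGetD records (-1) 0 ≤ PySem.List.pyGetD records 0 0)  -- records[-1] <= records[0], nonempty here
    else true

-- ===== PORT B =====
def is_cyclically_sorted_alt (records : List Int) : Bool :=
  -- pivot = next((i for i in range(len(records)-1) if records[i] > records[i+1]), None)
  match (PySem.List.pyRange 0 ((records.length : Int) - 1) 1).find?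
      (fun i => decide (PySem.List.pyGetD records i 0 > PySem.List.pyGetD records (i + 1) 0)) with
  | none => true
  | some pivot =>
      -- rotated = records[pivot+1:] + records[:pivot+1]
      let rotated := PySem.List.slice records (some (pivot + 1)) none ++
                     PySem.List.slice records none (some (pivot + 1))
      -- all(a <= b for a, b in zip(rotated, rotated[1:]))
      (rotated.zip (PySem.List.slice rotated (some 1) none)).all
        (fun ab => decide (ab.1 ≤ ab.2))

-- ===== PRECONDITION & SPEC =====
def Spec_is_cyclically_sorted (records : List Int) (out : Bool) : Prop := out = is_cyclically_sorted_alt records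
instance (records : List Int) (out : Bool) : Decidable (Spec_is_cyclically_sorted records out) := by unfold Spec_is_cyclically_sorted; infer_instance

-- ===== CLAIM (what is proved, stated in full; the proofs are below) =====
def Claim_equal_is_cyclically_sorted : Prop := ∀ (records : List Int), Dom_is_cyclically_sorted records → Spec_is_cyclically_sorted records (is_cyclically_sorted records)

-- ===== LEMMAS AND PROOFS =====

-- number of adjacent (non-wrapping) descents at positions ≥ i
def pvDCnt (records : List Int) (i : Nat) : Nat :=
  if h : i + 1 < records.length then
    (if PySem.List.pyGetD records (i : Int) 0 > PySem.List.pyGetD records ((i : Int) + 1) 0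
      then 1 else 0) + pvDCnt records (i + 1)
  else 0
termination_by records.length - i

lemma pvA_loop_eq (records : List Int) :
    ∀ i : Nat, ∀ t : Int, 0 ≤ t →
      pvA_loop records t (i : Int) = max (t - (pvDCnt records i : Int)) (-1) := by
  intro i
  induction' hn : records.length - i using Nat.strong_induction_on with k IH generalizing i
  intro t ht
  rw [pvA_loop, pvDCnt]
  by_cases h : i + 1 < records.length
  · have hg : 0 ≤ t ∧ (i : Int) < (records.length : Int) - 1 := ⟨ht, by omega⟩
    rw [dif_pos hg, dif_pos h]
    by_cases hd : PySem.List.pyGetD records (i : Int) 0 > PySem.List.pyGetD records ((i : Int) + 1) 0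
    · rw [if_pos hd, if_pos hd]
      by_cases ht0 : 0 ≤ t - 1
      · have := IH (records.length - (i + 1)) (by omega) (i + 1) rfl (t - 1) ht0
        push_cast at this ⊢
        rw [this]; omega
      · have ht1 : t = 0 := by omega
        rw [pvA_loop, dif_neg (by omega)]
        have : (0:Int) ≤ pvDCnt records (i + 1) := Int.natCast_nonneg _
        omega
    · rw [if_neg hd, if_neg hd]
      have := IH (records.length - (i + 1)) (by omega) (i + 1) rfl t ht
      push_cast at this ⊢
      rw [this]; omega
  · rw [dif_neg (by omega), dif_neg h]
    omega

-- pvDCnt i = 0 means no adjacent descent at any position ≥ i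
lemma pvDCnt_zero_iff (records : List Int) :
    ∀ i : Nat, (pvDCnt records i = 0 ↔
      ∀ j : Nat, i ≤ j → j + 1 < records.length →
        records.getD j 0 ≤ records.getD (j + 1) 0) := by
  intro i
  induction' hn : records.length - i using Nat.strong_induction_on with k IH generalizing i
  rw [pvDCnt]
  by_cases h : i + 1 < records.length
  · rw [dif_pos h]
    have IH' := IH (records.length - (i + 1)) (by omega) (i + 1) rfl
    have hcast : PySem.List.pyGetD records ((i : Int)) 0 = records.getD i 0 ∧
        PySem.List.pyGetD records ((i : Int) + 1) 0 = records.getD (i + 1) 0 := by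
      constructor
      · simp
      · have : ((i : Int) + 1) = ((i + 1 : Nat) : Int) := by push_cast; ring
        rw [this, PySem.List.pyGetD_natCast]
    constructor
    · intro hz j hij hj
      have hz2 : pvDCnt records (i + 1) = 0 := by omega
      rcases Nat.eq_or_lt_of_le hij with rfl | hlt
      · by_contra hgt
        rw [not_le] at hgt
        rw [if_pos (by rw [hcast.1, hcast.2]; exact hgt)] at hz
        omega
      · exact (IH'.mp hz2) j hlt hj
    · intro hall
      have h1 : ¬ (PySem.List.pyGetD records (i : Int) 0 >
          PySem.List.pyGetD records ((i : Int) + 1) 0) := by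
        rw [hcast.1, hcast.2]
        exact not_lt.mpr (hall i le_rfl h)
      rw [if_neg h1]
      simp [IH'.mpr (fun j hj hj2 => hall j (by omega) hj2)]
  · rw [dif_neg h]
    constructor
    · intro _ j hij hj
      omega
    · intro _; rfl

-- pvDCnt is unchanged when skipping over descent-free positions
lemma pvDCnt_skip (records : List Int) :
    ∀ i q : Nat, i ≤ q →
      (∀ j : Nat, i ≤ j → j < q → records.getD j 0 ≤ records.getD (j + 1) 0) →
      pvDCnt records i = pvDCnt records q := by
  intro i q
  induction' hn : q - i using Nat.strong_induction_on with k IH generalizing i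
  intro hiq hall
  rcases Nat.eq_or_lt_of_le hiq with rfl | hlt
  · rfl
  · rw [pvDCnt]
    by_cases h : i + 1 < records.length
    · rw [dif_pos h]
      have h1 : ¬ (PySem.List.pyGetD records (i : Int) 0 >
          PySem.List.pyGetD records ((i : Int) + 1) 0) := by
        have hc1 : PySem.List.pyGetD records ((i : Int)) 0 = records.getD i 0 := by simp
        have hc2 : PySem.List.pyGetD records ((i : Int) + 1) 0 = records.getD (i + 1) 0 := by
          have : ((i : Int) + 1) = ((i + 1 : Nat) : Int) := by push_cast; ring
          rw [this, PySem.List.pyGetD_natCast]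
        rw [hc1, hc2]
        exact not_lt.mpr (hall i le_rfl hlt)
      rw [if_neg h1, Nat.zero_add]
      exact IH (q - (i + 1)) (by omega) (i + 1) rfl hlt
        (fun j hj hj2 => hall j (by omega) hj2)
    · rw [dif_neg h]
      have : pvDCnt records q = 0 := by
        rw [pvDCnt, dif_neg (by omega)]
      omega

-- find? over pyRange a b 1 returning some p: p is in range, satisfies f, and is first
lemma find?_pyRange_some (f : Int → Bool) :
    ∀ a b p : Int, (PySem.List.pyRange a b 1).find? f = some p →
      a ≤ p ∧ p < b ∧ f p = true ∧ ∀ j : Int, a ≤ j → j < p → f j = false := by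
  intro a b
  induction' hn : (b - a).toNat using Nat.strong_induction_on with k IH generalizing a
  intro p h
  by_cases hab : a < b
  · rw [PySem.List.pyRange_one_cons hab] at h
    by_cases hfa : f a = true
    · rw [List.find?_cons_of_pos hfa] at h
      injection h with h
      subst h
      exact ⟨le_refl _, hab, hfa, fun j h1 h2 => absurd h2 (by omega)⟩
    · rw [List.find?_cons_of_neg (by simpa using hfa)] at h
      have := IH ((b - (a + 1)).toNat) (by omega) (a + 1) rfl p h
      refine ⟨by omega, this.2.1, this.2.2.1, ?_⟩
      intro j hj1 hj2
      rcases eq_or_lt_of_le hj1 with rfl | hj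
      · simpa using hfa
      · exact this.2.2.2 j (by omega) hj2
  · rw [PySem.List.pyRange_one_eq_nil (by omega)] at h
    simp at h

-- zipped pairwise ≤ is IsChain (· ≤ ·)
lemma zipAll_le_iff (l : List Int) :
    (((l.zip l.tail).all fun ab => decide (ab.1 ≤ ab.2)) = true) ↔ l.IsChain (· ≤ ·) := by
  induction l with
  | nil => simp
  | cons a t IH =>
    cases t with
    | nil => simp
    | cons b t' =>
      simp only [List.tail_cons, List.zip_cons_cons, List.all_cons] at *
      rw [List.isChain_cons_cons, ← IH]
      by_cases hab : a ≤ b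
      · simp [hab]
      · simp [hab]

-- IsChain on a drop, in terms of indexwise non-descent
lemma chain'_drop_iff (records : List Int) (k : Nat) :
    (records.drop k).IsChain (· ≤ ·) ↔
      ∀ j : Nat, k ≤ j → j + 1 < records.length →
        records.getD j 0 ≤ records.getD (j + 1) 0 := by
  rw [List.isChain_iff_getElem]
  constructor
  · intro h j hkj hj
    have hlen : j - k + 1 < (records.drop k).length := by
      simp; omega
    have := h (j - k) hlen
    simp only [List.getElem_drop] at this
    rw [List.getD_eq_getElem _ _ (by omega), List.getD_eq_getElem _ _ hj]
    have e1 : k + (j - k) = j := by omega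
    have e2 : k + (j - k + 1) = j + 1 := by omega
    simp only [e1, e2] at this
    exact this
  · intro h i hi
    simp only [List.getElem_drop]
    have hlen : k + i + 1 < records.length := by
      simp at hi; omega
    have := h (k + i) (by omega) hlen
    rw [List.getD_eq_getElem _ _ (by omega), List.getD_eq_getElem _ _ hlen] at this
    simpa [Nat.add_assoc] using this

-- IsChain on a take, from indexwise non-descent below the cut
lemma chain'_take (records : List Int) (m : Nat)
    (h : ∀ j : Nat, j + 1 < m → j + 1 < records.length →
      records.getD j 0 ≤ records.getD (j + 1) 0) :
    (records.take m).IsChain (· ≤ ·) := by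
  rw [List.isChain_iff_getElem]
  intro i hi
  simp only [List.length_take, lt_min_iff] at hi
  have h1 := h i hi.1 hi.2
  rw [List.getElem_take, List.getElem_take]
  rw [List.getD_eq_getElem _ _ (by omega), List.getD_eq_getElem _ _ hi.2] at h1
  exact h1

-- ===== VERDICT (by name: the statement is the Claim_ definition above) =====
theorem is_cyclically_sorted_spec : Claim_equal_is_cyclically_sorted := by
  intro records _
  unfold Spec_is_cyclically_sorted
  cases hfind : (PySem.List.pyRange 0 ((records.length : Int) - 1) 1).find?
      (fun i => decide (PySem.List.pyGetD records i 0 > PySem.List.pyGetD records (i + 1) 0)) with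
  | none =>
    have hB : is_cyclically_sorted_alt records = true := by
      unfold is_cyclically_sorted_alt
      rw [hfind]
    rw [hB]
    unfold is_cyclically_sorted
    by_cases h0 : records.length = 0
    · rw [if_pos h0]
    · rw [if_neg h0]
      have hz : pvDCnt records 0 = 0 := by
        rw [pvDCnt_zero_iff]
        intro j _ hjn
        have hmem : (j : Int) ∈ PySem.List.pyRange 0 ((records.length : Int) - 1) 1 := by
          rw [PySem.List.mem_pyRange_one]
          constructor
          · exact Int.natCast_nonneg _
          · omega
        have hf := List.find?_eq_none.mp hfind _ hmem
        simp only [decide_eq_true_eq] at hf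
        have hc2 : ((j : Int) + 1) = ((j + 1 : Nat) : Int) := by push_cast; ring
        rw [hc2, PySem.List.pyGetD_natCast, PySem.List.pyGetD_natCast] at hf
        omega
      have htok : pvA_loop records 1 0 = 1 := by
        have := pvA_loop_eq records 0 1 (by omega)
        rw [hz] at this
        simpa using this
      simp only [htok]
      norm_num
  | some p =>
    have hp := find?_pyRange_some _ 0 ((records.length : Int) - 1) p hfind
    obtain ⟨hp0, hplt, hfp, hfirst⟩ := hp
    obtain ⟨q, rfl⟩ : ∃ q : Nat, p = (q : Int) := ⟨p.toNat, (Int.toNat_of_nonneg hp0).symm⟩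
    have hq1 : q + 1 < records.length := by
      have : (q : Int) < (records.length : Int) - 1 := hplt
      omega
    have h0 : ¬ records.length = 0 := by omega
    have hcast1 : (q : Int) + 1 = ((q + 1 : Nat) : Int) := by push_cast; ring
    have hdesc : records.getD (q + 1) 0 < records.getD q 0 := by
      have hf := of_decide_eq_true hfp
      rwa [hcast1, PySem.List.pyGetD_natCast, PySem.List.pyGetD_natCast] at hf
    have hnod : ∀ j : Nat, j < q → records.getD j 0 ≤ records.getD (j + 1) 0 := by
      intro j hj
      have hf := hfirst (j : Int) (Int.natCast_nonneg _) (by exact_mod_cast hj)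
      simp only [decide_eq_false_iff_not] at hf
      have hc2 : ((j : Int) + 1) = ((j + 1 : Nat) : Int) := by push_cast; ring
      rw [hc2, PySem.List.pyGetD_natCast, PySem.List.pyGetD_natCast] at hf
      omega
    have hD : pvDCnt records 0 = 1 + pvDCnt records (q + 1) := by
      rw [pvDCnt_skip records 0 q (by omega) (fun j _ hj => hnod j hj)]
      rw [pvDCnt, dif_pos hq1, if_pos (by
        rw [hcast1, PySem.List.pyGetD_natCast, PySem.List.pyGetD_natCast]
        exact hdesc)]
    -- B reduces to the zip-all over the rotation
    have hB : is_cyclically_sorted_alt records =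
        ((records.drop (q + 1) ++ records.take (q + 1)).zip
          ((records.drop (q + 1) ++ records.take (q + 1)).tail)).all
          (fun ab => decide (ab.1 ≤ ab.2)) := by
      unfold is_cyclically_sorted_alt
      rw [hfind]
      simp only [hcast1, PySem.List.slice_from_natCast, PySem.List.slice_to_natCast,
        PySem.List.slice_from_one]
    -- the rotation is a chain iff the suffix has no descent and the wrap pair is ordered
    have hdl : (records.drop (q + 1)).getLast? = some (records.getD (records.length - 1) 0) := by
      rw [List.getLast?_eq_getElem?, List.getElem?_drop, List.length_drop]
      have he : q + 1 + (records.length - (q + 1) - 1) = records.length - 1 := by omega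
      rw [he, List.getElem?_eq_getElem (by omega), List.getD_eq_getElem _ _ (by omega)]
    have hth : (records.take (q + 1)).head? = some (records.getD 0 0) := by
      cases records with
      | nil => simp at hq1
      | cons a t => rw [List.take_succ_cons]; rfl
    have hrot : (records.drop (q + 1) ++ records.take (q + 1)).IsChain (· ≤ ·) ↔
        (pvDCnt records (q + 1) = 0 ∧
          records.getD (records.length - 1) 0 ≤ records.getD 0 0) := by
      rw [List.isChain_append, chain'_drop_iff, ← pvDCnt_zero_iff, hdl]
      constructor
      · rintro ⟨h1, _, h3⟩
        refine ⟨h1, ?_⟩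
        have := h3 _ rfl
        rw [hth] at this
        exact this _ rfl
      · rintro ⟨h1, h2⟩
        refine ⟨h1, chain'_take records (q + 1) (fun j hj hjn => hnod j (by omega)), ?_⟩
        intro x hx y hy
        rw [hth] at hy
        simp only [Option.mem_def, Option.some_inj] at hx hy
        rw [← hx, ← hy]
        exact h2
    have hBiff : (((records.drop (q + 1) ++ records.take (q + 1)).zip
          ((records.drop (q + 1) ++ records.take (q + 1)).tail)).all
          (fun ab => decide (ab.1 ≤ ab.2)) = true) ↔
        (pvDCnt records (q + 1) = 0 ∧
          records.getD (records.length - 1) 0 ≤ records.getD 0 0) :=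
      (zipAll_le_iff _).trans hrot
    -- A reduces via the loop characterisation
    have htok : pvA_loop records 1 0 =
        max (1 - ((1 + pvDCnt records (q + 1) : Nat) : Int)) (-1) := by
      have := pvA_loop_eq records 0 1 (by omega)
      rw [hD] at this
      simpa using this
    have hlastA : PySem.List.pyGetD records (-1) 0 = records.getD (records.length - 1) 0 := by
      have hne : records ≠ [] := by
        cases records
        · simp at hq1
        · simp
      rw [PySem.List.pyGetD_neg_one _ _ hne, List.getLast_eq_getElem,
        List.getD_eq_getElem _ _ (by omega)]
    have hheadA : PySem.List.pyGetD records 0 0 = records.getD 0 0 := by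
      exact PySem.List.pyGetD_zero records 0
    rw [hB]
    unfold is_cyclically_sorted
    rw [if_neg h0]
    simp only [htok, hlastA, hheadA]
    cases hb : ((records.drop (q + 1) ++ records.take (q + 1)).zip
        ((records.drop (q + 1) ++ records.take (q + 1)).tail)).all
        (fun ab => decide (ab.1 ≤ ab.2)) with
    | true =>
      obtain ⟨hc0, hlh⟩ := hBiff.mp hb
      rw [hc0]
      have hm : max (1 - ((1 + 0 : Nat) : Int)) (-1) = 0 := by norm_num
      rw [hm, if_neg (by norm_num), if_pos rfl]
      exact decide_eq_true hlh
    | false =>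
      have hnc := (not_iff_not.mpr hBiff).mp (by simp [hb])
      by_cases hc0 : pvDCnt records (q + 1) = 0
      · have hlh : ¬ records.getD (records.length - 1) 0 ≤ records.getD 0 0 := by
          intro h; exact hnc ⟨hc0, h⟩
        rw [hc0]
        have hm : max (1 - ((1 + 0 : Nat) : Int)) (-1) = 0 := by norm_num
        rw [hm, if_neg (by norm_num), if_pos rfl]
        exact decide_eq_false hlh
      · have hc1 : 1 ≤ pvDCnt records (q + 1) := by omega
        have hmax : max (1 - ((1 + pvDCnt records (q + 1) : Nat) : Int)) (-1) = -1 := by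
          omega
        rw [hmax, if_pos (by norm_num)]
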